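-- pv_equiv track=rewrite | github.com/regulatorystudies/Reg-Stats | dynamic_dashboard/unified_agenda_data/unified_agenda_data_analysis.py | _agenda_year_for_admin_n
-- ===== SOURCE A (Python) =====
-- ADMIN_TERMS = {
--     'Clinton': [(1993, 2001)],
--     'Bush 43': [(2001, 2009)],
--     'Obama': [(2009, 2017)],
--     'Trump 45': [(2017, 2021)],
--     'Biden': [(2021, 2025)],
--     'Trump 47': [(2025, 2029)],
-- }
--
-- def _agenda_year_for_admin_n(admin: str, n: int, season: str) -> int:
--     """
--     Inverse of agenda numbering: return the year for the nth agenda of `season`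
--     within an administration, accounting for non-consecutive terms.
--     """
--     if n < 1:
--         raise ValueError("Agenda number must be >= 1.")
--
--     # Ensure requested season matches n parity (odd=spring, even=fall)
--     if (season == 'spring' and n % 2 == 0) or (season == 'fall' and n % 2 == 1):
--         raise ValueError("Season does not match agenda number parity.")
--
--     remaining = n
--     for start, end in ADMIN_TERMS[admin]:
--         term_total = (end - start) * 2
--         if remaining > term_total:
--             remaining -= term_total
--             continue
--         # remaining is within this term
--         year_offset = (remaining - 1) // 2
--         year_val = start + year_offset
--         if not (start <= year_val < end):
--             raise ValueError("Computed year is outside admin term bounds.")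
--         return year_val
--
--     raise ValueError(f"Administration {admin} does not have agenda #{n}.")
-- ===== SOURCE B (Python) =====
-- ADMIN_TERMS = {
--     'Clinton': [(1993, 2001)],
--     'Bush 43': [(2001, 2009)],
--     'Obama': [(2009, 2017)],
--     'Trump 45': [(2017, 2021)],
--     'Biden': [(2021, 2025)],
--     'Trump 47': [(2025, 2029)],
-- }
--
-- def _agenda_year_for_admin_n(admin: str, n: int, season: str) -> int:
--     """Inverse of agenda numbering via a flat year table: years[k] is the year
--     of agenda #(k+1) for the admin (each year appears twice: spring, fall)."""
--     if n < 1: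
--         raise ValueError("Agenda number must be >= 1.")
--     if (season == 'spring' and n % 2 == 0) or (season == 'fall' and n % 2 == 1):
--         raise ValueError("Season does not match agenda number parity.")
--     years = [y for start, end in ADMIN_TERMS[admin] for y in range(start, end) for _ in (0, 1)]
--     if n - 1 < len(years):
--         return years[n - 1]
--     raise ValueError(f"Administration {admin} does not have agenda #{n}.")
-- ===== Notes on version B (the rewrite author's own statement) =====
-- stated objective: simpler
-- what changed: Replaces the subtract-remaining scan over the admin's terms (with per-term offset arithmetic and an unreachable bounds check) by building a flat year table (each year twice, spring then fall) and indexing it at n-1.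
import Mathlib
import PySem

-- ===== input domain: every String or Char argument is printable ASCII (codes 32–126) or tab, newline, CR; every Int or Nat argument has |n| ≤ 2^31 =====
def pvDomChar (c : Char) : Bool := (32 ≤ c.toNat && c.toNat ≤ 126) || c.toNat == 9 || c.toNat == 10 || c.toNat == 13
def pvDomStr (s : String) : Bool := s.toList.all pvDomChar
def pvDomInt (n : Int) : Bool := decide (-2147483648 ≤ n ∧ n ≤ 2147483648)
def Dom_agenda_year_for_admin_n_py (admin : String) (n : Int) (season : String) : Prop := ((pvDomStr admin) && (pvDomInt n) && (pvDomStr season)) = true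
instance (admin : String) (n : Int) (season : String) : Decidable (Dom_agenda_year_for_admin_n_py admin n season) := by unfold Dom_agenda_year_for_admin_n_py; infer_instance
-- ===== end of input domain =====

-- B replaces A's subtract-remaining scan over terms by building a flat per-admin year
-- table (each year twice: spring, fall) and indexing it at n-1; objective: simpler.

-- ADMIN_TERMS: module-level dict, shared by both Pythons
def ADMIN_TERMS : PySem.Dict String (List (Int × Int)) :=
  PySem.Dict.ofList [("Clinton", [(1993, 2001)]), ("Bush 43", [(2001, 2009)]),
    ("Obama", [(2009, 2017)]), ("Trump 45", [(2017, 2021)]),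
    ("Biden", [(2021, 2025)]), ("Trump 47", [(2025, 2029)])]

-- ===== PORT A =====
-- A's for-loop over ADMIN_TERMS[admin] carrying `remaining`; `none` = a raise path
def agendaLoopA : List (Int × Int) → Int → Option Int
  | [], _ => none
  | (start, «end») :: rest, remaining =>
    let term_total := («end» - start) * 2
    if remaining > term_total then agendaLoopA rest (remaining - term_total)
    else
      let year_offset := PySem.Int.floordiv (remaining - 1) 2
      let year_val := start + year_offset
      if start ≤ year_val ∧ year_val < «end» then year_val else none

def agenda_year_for_admin_n_py (admin : String) (n : Int) (season : String) : Int :=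
  if n < 1 then 0   -- raise ValueError
  else if (season == "spring" && PySem.Int.mod n 2 == 0)
       || (season == "fall" && PySem.Int.mod n 2 == 1) then 0   -- raise ValueError
  else match ADMIN_TERMS.get? admin with
    | none => 0   -- KeyError
    | some terms =>
      match agendaLoopA terms n with
      | some y => y
      | none => 0   -- raise ValueError

-- ===== PORT B =====
-- flat table: [y for start, end in terms for y in range(start, end) for _ in (0, 1)]
def yearTable (terms : List (Int × Int)) : List Int :=
  terms.foldl (fun acc se =>
    (PySem.List.pyRange se.1 se.2 1).foldl (fun a y => a ++ [y, y]) acc) []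

def agenda_year_for_admin_n_py_alt (admin : String) (n : Int) (season : String) : Int :=
  if n < 1 then 0   -- raise ValueError
  else if (season == "spring" && PySem.Int.mod n 2 == 0)
       || (season == "fall" && PySem.Int.mod n 2 == 1) then 0   -- raise ValueError
  else match ADMIN_TERMS.get? admin with
    | none => 0   -- KeyError
    | some terms =>
      match PySem.List.pyGet? (yearTable terms) (n - 1) with
      | some y => y
      | none => 0   -- raise ValueError

-- ===== PRECONDITION & SPEC =====
-- Pre_ excludes exactly the inputs where A raises: n < 1, season/parity mismatch,
-- unknown admin (KeyError), and n beyond the admin's total number of agendas.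
def Pre_agenda_year_for_admin_n_py (admin : String) (n : Int) (season : String) : Prop :=
  1 ≤ n ∧
  ¬ ((season = "spring" ∧ n % 2 = 0) ∨ (season = "fall" ∧ n % 2 = 1)) ∧
  (((admin = "Clinton" ∨ admin = "Bush 43" ∨ admin = "Obama") ∧ n ≤ 16) ∨
   ((admin = "Trump 45" ∨ admin = "Biden" ∨ admin = "Trump 47") ∧ n ≤ 8))
instance (admin : String) (n : Int) (season : String) : Decidable (Pre_agenda_year_for_admin_n_py admin n season) := by unfold Pre_agenda_year_for_admin_n_py; infer_instance

def pvWitness_agenda_year_for_admin_n_py : String × Int × String := ("Clinton", 3, "spring")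

def Spec_agenda_year_for_admin_n_py (admin : String) (n : Int) (season : String) (out : Int) : Prop := out = agenda_year_for_admin_n_py_alt admin n season
instance (admin : String) (n : Int) (season : String) (out : Int) : Decidable (Spec_agenda_year_for_admin_n_py admin n season out) := by unfold Spec_agenda_year_for_admin_n_py; infer_instance

-- ===== CLAIM (what is proved, stated in full; the proofs are below) =====
def Claim_equal_agenda_year_for_admin_n_py : Prop := ∀ (admin : String) (n : Int) (season : String), Dom_agenda_year_for_admin_n_py admin n season → Pre_agenda_year_for_admin_n_py admin n season → Spec_agenda_year_for_admin_n_py admin n season (agenda_year_for_admin_n_py admin n season)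

-- ===== LEMMAS AND PROOFS =====

-- ===== VERDICT (by name: the statement is the Claim_ definition above) =====
theorem agenda_year_for_admin_n_py_spec : Claim_equal_agenda_year_for_admin_n_py := by
  intro admin n season _ hPre
  obtain ⟨hn, _, hadm⟩ := hPre
  unfold Spec_agenda_year_for_admin_n_py agenda_year_for_admin_n_py agenda_year_for_admin_n_py_alt
  rcases hadm with ⟨h3, hle⟩ | ⟨h3, hle⟩ <;>
    rcases h3 with h | h | h <;> subst h <;>
    split_ifs <;> first
      | rfl
      | (interval_cases n <;> decide)
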